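-- pv_equiv track=rewrite | github.com/Saumya-ranjan/Mastering-Coding | MICROSOFT MOST ASKED QUESTIONS/MICROSOFT OA/set6 [IMP] [max_insert_a_to_not_form_3_consecutive].py | add_a
-- ===== SOURCE A (Python) =====
-- def add_a(arr):
--     overall_a = 0
--     count_a = 0
--     other = 0
--     for i in range(len(arr)):
--         if arr[i] == 'a':
--             count_a+=1
--         elif arr[i] != 'a':
--             other+=1
--             overall_a += count_a
--             count_a = 0
--         if count_a > 2:
--             return -1
--     if count_a > 2:
--         return -1
--     else:
--         overall_a+= count_a
--     return 2*(other+1) - overall_a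
-- ===== SOURCE B (Python) =====
-- def add_a(arr):
--     n = len(arr)
--     for i in range(n - 2):
--         if arr[i] == 'a' and arr[i + 1] == 'a' and arr[i + 2] == 'a':
--             return -1
--     total_a = arr.count('a')
--     return 2 * (n - total_a + 1) - total_a
-- ===== Notes on version B (the rewrite author's own statement) =====
-- stated objective: simpler
-- what changed: A's single fused pass maintaining a running run-length, a pending-run accumulator and a non-'a' counter is replaced by a sliding triple-window scan for a length-3 run of 'a' plus a plain str.count and the closed form 2*(other+1)-total_a.
import Mathlib
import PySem

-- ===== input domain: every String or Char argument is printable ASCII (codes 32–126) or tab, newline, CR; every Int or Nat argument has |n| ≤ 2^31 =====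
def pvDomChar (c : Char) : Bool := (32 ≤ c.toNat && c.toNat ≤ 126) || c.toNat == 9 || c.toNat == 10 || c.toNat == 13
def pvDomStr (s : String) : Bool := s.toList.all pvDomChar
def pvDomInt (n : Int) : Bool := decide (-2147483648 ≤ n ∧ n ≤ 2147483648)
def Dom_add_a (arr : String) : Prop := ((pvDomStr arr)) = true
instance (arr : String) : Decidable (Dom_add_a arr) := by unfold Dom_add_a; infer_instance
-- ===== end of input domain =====

-- B replaces A's fused run-length/pending-sum pass by a triple-window 'aaa' scan plus a plain count and a closed form (simpler).

-- ===== PORT A =====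
-- the for-loop of A, state (overall_a, count_a, other); the final count_a>2 check and
-- overall_a += count_a of A's epilogue are the [] case
def addALoop : List Char → Int → Int → Int → Int
  | [], overall, count, other =>
      if count > 2 then -1 else 2 * (other + 1) - (overall + count)
  | c :: rest, overall, count, other =>
      if c = 'a' then
        (if count + 1 > 2 then -1 else addALoop rest overall (count + 1) other)
      else
        -- after the elif branch count_a is 0, A still checks 'if count_a > 2'
        (if (0 : Int) > 2 then -1 else addALoop rest (overall + count) 0 (other + 1))

def add_a (arr : String) : Int := addALoop arr.toList 0 0 0

-- ===== PORT B =====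
-- the window loop 'for i in range(n-2): if arr[i]==arr[i+1]==arr[i+2]=='a'': return -1'
def hasAAA : List Char → Bool
  | a :: b :: c :: rest => (a = 'a' && b = 'a' && c = 'a') || hasAAA (b :: c :: rest)
  | _ => false

def add_a_alt (arr : String) : Int :=
  let l := arr.toList
  if hasAAA l then -1
  else
    let total : Int := (l.count 'a' : Int)
    2 * ((l.length : Int) - total + 1) - total

-- ===== PRECONDITION & SPEC =====
def Spec_add_a (arr : String) (out : Int) : Prop := out = add_a_alt arr
instance (arr : String) (out : Int) : Decidable (Spec_add_a arr out) := by unfold Spec_add_a; infer_instance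

-- ===== CLAIM (what is proved, stated in full; the proofs are below) =====
def Claim_equal_add_a : Prop := ∀ (arr : String), Dom_add_a arr → Spec_add_a arr (add_a arr)

-- ===== LEMMAS AND PROOFS =====
def startsA : List Char → Bool
  | c :: _ => c = 'a'
  | _ => false

def startsAA : List Char → Bool
  | b :: c :: _ => b = 'a' && c = 'a'
  | _ => false

theorem hasAAA_cons (c : Char) (rest : List Char) :
    hasAAA (c :: rest) = (((c = 'a') && startsAA rest) || hasAAA rest) := by
  match rest with
  | [] => simp [hasAAA, startsAA]
  | [b] => simp [hasAAA, startsAA]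
  | b :: d :: t => simp [hasAAA, startsAA, Bool.and_assoc]

theorem startsAA_imp_startsA (l : List Char) (h : startsAA l = true) : startsA l = true := by
  match l with
  | [] => simp [startsAA] at h
  | [b] => simp [startsAA] at h
  | b :: d :: t => simp [startsAA] at h; simp [startsA, h.1]

theorem hasAAA_cons_a (rest : List Char) :
    hasAAA ('a' :: rest) = (startsAA rest || hasAAA rest) := by
  rw [hasAAA_cons]; simp

theorem hasAAA_cons_ne (c : Char) (rest : List Char) (hc : ¬ c = 'a') :
    hasAAA (c :: rest) = hasAAA rest := by
  rw [hasAAA_cons]; simp [hc]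

theorem key (l : List Char) : ∀ (ov oth : Int),
    (addALoop l ov 0 oth =
      (if hasAAA l then -1
       else 2 * (oth + ((l.length : Int) - (l.count 'a' : Int)) + 1) - (ov + 0 + (l.count 'a' : Int)))) ∧
    (addALoop l ov 1 oth =
      (if (startsAA l || hasAAA l) then -1
       else 2 * (oth + ((l.length : Int) - (l.count 'a' : Int)) + 1) - (ov + 1 + (l.count 'a' : Int)))) ∧
    (addALoop l ov 2 oth =
      (if (startsA l || hasAAA l) then -1
       else 2 * (oth + ((l.length : Int) - (l.count 'a' : Int)) + 1) - (ov + 2 + (l.count 'a' : Int)))) := by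
  induction l with
  | nil =>
    intro ov oth
    refine ⟨?_, ?_, ?_⟩ <;> simp [addALoop, hasAAA, startsA, startsAA]
  | cons c rest ih =>
    intro ov oth
    by_cases hc : c = 'a'
    · subst hc
      have h1 := (ih ov oth).2.1
      have h2 := (ih ov oth).2.2
      have hcnt : List.count 'a' ('a' :: rest) = List.count 'a' rest + 1 :=
        List.count_cons_self
      refine ⟨?_, ?_, ?_⟩
      · -- count 0 → 1
        rw [addALoop, if_pos rfl, if_neg (by omega : ¬ ((0:Int) + 1 > 2)),
          show (0:Int) + 1 = 1 from by norm_num, h1, hasAAA_cons_a, hcnt, List.length_cons]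
        split_ifs with hb
        · rfl
        · push_cast; ring
      · -- count 1 → 2
        rw [addALoop, if_pos rfl, if_neg (by omega : ¬ ((1:Int) + 1 > 2)),
          show (1:Int) + 1 = 2 from by norm_num, h2, hasAAA_cons_a, hcnt, List.length_cons]
        have hsAA : startsAA ('a' :: rest) = startsA rest := by
          match rest with
          | [] => simp [startsAA, startsA]
          | b :: t => simp [startsAA, startsA]
        rw [hsAA]
        have hcond : (startsA rest || (startsAA rest || hasAAA rest))
            = (startsA rest || hasAAA rest) := by
          cases hAA : startsAA rest
          · simp
          · simp [startsAA_imp_startsA rest hAA]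
        rw [hcond]
        split_ifs with hb
        · rfl
        · push_cast; ring
      · -- count 2 → return -1
        rw [addALoop, if_pos rfl, if_pos (by omega : ((2:Int) + 1 > 2)),
          show startsA ('a' :: rest) = true from by simp [startsA]]
        rw [Bool.true_or, if_pos rfl]
    · have h0 := (ih (ov + 0) (oth + 1)).1
      have h0' := (ih (ov + 1) (oth + 1)).1
      have h0'' := (ih (ov + 2) (oth + 1)).1
      have hcnt : List.count 'a' (c :: rest) = List.count 'a' rest := by
        simp [hc]
      have hsA : startsA (c :: rest) = false := by simp [startsA, hc]
      have hsAA : startsAA (c :: rest) = false := by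
        match rest with
        | [] => simp [startsAA]
        | b :: t => simp [startsAA, hc]
      refine ⟨?_, ?_, ?_⟩ <;>
        · rw [addALoop, if_neg hc, if_neg (by omega : ¬ ((0:Int) > 2))]
          first
            | rw [h0]
            | rw [h0']
            | rw [h0'']
          rw [hasAAA_cons_ne c rest hc, hcnt, List.length_cons]
          try simp only [hsA, hsAA, Bool.false_or]
          split_ifs with hb
          · rfl
          · push_cast; ring

-- ===== VERDICT (by name: the statement is the Claim_ definition above) =====
theorem add_a_spec : Claim_equal_add_a := by
  intro arr _
  unfold Spec_add_a add_a add_a_alt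
  have h := (key arr.toList 0 0).1
  rw [h]
  cases hA : hasAAA arr.toList
  · simp only [hA, Bool.false_eq_true, if_false]; omega
  · simp only [hA, if_true]
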